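-- pv_equiv track=rewrite | github.com/sanchescom/JobSpy | jobspy/twitter/_twscrape_patch.py | _extract_balanced_object
-- ===== SOURCE A (Python) =====
-- def _extract_balanced_object(text: str, close_idx: int) -> str | None:
--     """Walk back from ``close_idx`` (a ``}`` position) to its matching ``{`` and
--     return the inclusive substring, or ``None`` if braces don't balance."""
--     if close_idx < 0 or close_idx >= len(text) or text[close_idx] != "}":
--         return None
--     depth = 1
--     i = close_idx - 1
--     while i >= 0:
--         ch = text[i]
--         if ch == "}":
--             depth += 1
--         elif ch == "{":
--             depth -= 1
--             if depth == 0: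
--                 return text[i : close_idx + 1]
--         i -= 1
--     return None
-- ===== SOURCE B (Python) =====
-- def _extract_balanced_object(text: str, close_idx: int) -> str | None:
--     """Forward single pass keeping a stack of indices of unmatched '{';
--     the stack top after the prefix is the match of the '}' at close_idx."""
--     if close_idx < 0 or close_idx >= len(text) or text[close_idx] != "}":
--         return None
--     stack = []
--     for i in range(close_idx):
--         ch = text[i]
--         if ch == "{":
--             stack.append(i)
--         elif ch == "}":
--             if stack:
--                 stack.pop()
--     if not stack:
--         return None
--     return text[stack[-1] : close_idx + 1]
-- ===== Notes on version B (the rewrite author's own statement) =====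
-- stated objective: alternative
-- what changed: Replaces A's backward depth-counting walk from close_idx with a forward scan from the start of the string that maintains a stack of indices of unmatched '{', the stack top at close_idx being the matching open brace.
import Mathlib
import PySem

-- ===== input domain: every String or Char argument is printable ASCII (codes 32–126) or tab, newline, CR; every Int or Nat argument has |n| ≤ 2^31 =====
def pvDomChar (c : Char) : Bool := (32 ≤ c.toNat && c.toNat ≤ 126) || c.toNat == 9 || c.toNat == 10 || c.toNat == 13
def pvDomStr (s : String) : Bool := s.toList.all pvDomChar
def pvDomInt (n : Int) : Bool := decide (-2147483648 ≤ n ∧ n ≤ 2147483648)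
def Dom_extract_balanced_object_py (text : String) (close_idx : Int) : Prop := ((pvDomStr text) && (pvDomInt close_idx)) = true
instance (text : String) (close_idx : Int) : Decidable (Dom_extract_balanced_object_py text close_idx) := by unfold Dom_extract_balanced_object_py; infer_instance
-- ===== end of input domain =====

-- B replaces A's backward depth-counting walk by a forward scan maintaining a stack of
-- indices of unmatched '{' (alternative decomposition, same cost; return value only).

-- ===== PORT A =====
-- A's while loop: i runs from close_idx-1 down to 0; the Nat argument is i+1 (0 = loop exit).
-- The guard ensures every index read is in range, so getD is exact for text[i].
def pvALoop (cs : List Char) (close : Nat) : Nat → Int → Option String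
  | 0, _ => none
  | i+1, depth =>
    let ch := cs.getD i ' '
    if ch = '}' then pvALoop cs close i (depth + 1)
    else if ch = '{' then
      if depth - 1 = 0 then some (String.ofList ((cs.drop i).take (close + 1 - i)))
      else pvALoop cs close i (depth - 1)
    else pvALoop cs close i depth

def extract_balanced_object_py (text : String) (close_idx : Int) : Option String :=
  let cs := text.toList
  if close_idx < 0 ∨ (cs.length : Int) ≤ close_idx ∨ cs.getD close_idx.toNat ' ' ≠ '}' then none
  else pvALoop cs close_idx.toNat close_idx.toNat 1

-- ===== PORT B =====
-- Source B's for-loop over range(close_idx); the stack keeps the most recent unmatched '{' at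
-- its head (Python appends/pops at the end). Indices read are in range, so getD is exact.
def pvBStep (cs : List Char) (st : List Nat) (j : Nat) : List Nat :=
  let ch := cs.getD j ' '
  if ch = '{' then j :: st
  else if ch = '}' then st.tail
  else st

def extract_balanced_object_py_alt (text : String) (close_idx : Int) : Option String :=
  let cs := text.toList
  if close_idx < 0 ∨ (cs.length : Int) ≤ close_idx ∨ cs.getD close_idx.toNat ' ' ≠ '}' then none
  else
    let close := close_idx.toNat
    let stack := (List.range close).foldl (pvBStep cs) []
    match stack.head? with
    | none => none
    | some j => some (String.ofList ((cs.drop j).take (close + 1 - j)))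

-- ===== PRECONDITION & SPEC =====
def Spec_extract_balanced_object_py (text : String) (close_idx : Int) (out : Option String) : Prop := out = extract_balanced_object_py_alt text close_idx
instance (text : String) (close_idx : Int) (out : Option String) : Decidable (Spec_extract_balanced_object_py text close_idx out) := by unfold Spec_extract_balanced_object_py; infer_instance

-- ===== CLAIM (what is proved, stated in full; the proofs are below) =====
def Claim_equal_extract_balanced_object_py : Prop := ∀ (text : String) (close_idx : Int), Dom_extract_balanced_object_py text close_idx → Spec_extract_balanced_object_py text close_idx (extract_balanced_object_py text close_idx)

-- ===== LEMMAS AND PROOFS =====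

-- A's backward walk at index i with depth d+1 returns the slice at the d-th entry (from the
-- top) of B's stack built from the first i characters.
theorem pvALoop_eq_stack (cs : List Char) (close : Nat) :
    ∀ (i d : Nat),
      pvALoop cs close i ((d : Int) + 1) =
        (((List.range i).foldl (pvBStep cs) [])[d]?).map
          (fun j => String.ofList ((cs.drop j).take (close + 1 - j))) := by
  intro i
  induction i with
  | zero => intro d; simp [pvALoop]
  | succ i ih =>
    intro d
    rw [List.range_succ, List.foldl_append, List.foldl_cons, List.foldl_nil]
    simp only [pvALoop, pvBStep]
    by_cases h1 : cs.getD i ' ' = '}'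
    · -- A increments depth; B pops
      rw [if_pos h1]
      have h2 : ¬ cs.getD i ' ' = '{' := by rw [h1]; decide
      rw [if_neg h2, if_pos h1]
      have e : (d : Int) + 1 + 1 = ((d + 1 : Nat) : Int) + 1 := by push_cast; ring
      rw [e, ih (d + 1), List.getElem?_tail]
    · by_cases h2 : cs.getD i ' ' = '{'
      · -- A decrements depth; B pushes index i
        rw [if_neg h1, if_pos h2, if_pos h2]
        cases d with
        | zero =>
          rw [if_pos (by norm_num : ((0 : Nat) : Int) + 1 - 1 = 0)]
          simp
        | succ k =>
          rw [if_neg (by push_cast; omega : ¬(((k + 1 : Nat) : Int) + 1 - 1 = 0))]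
          have e : ((k + 1 : Nat) : Int) + 1 - 1 = ((k : Nat) : Int) + 1 := by push_cast; ring
          rw [e, ih k]
          simp
      · -- neither brace: both sides skip
        rw [if_neg h1, if_neg h2, if_neg h2, if_neg h1, ih d]

-- ===== VERDICT (by name: the statement is the Claim_ definition above) =====
theorem extract_balanced_object_py_spec : Claim_equal_extract_balanced_object_py := by
  intro text close_idx _
  unfold Spec_extract_balanced_object_py extract_balanced_object_py extract_balanced_object_py_alt
  by_cases hg : close_idx < 0 ∨ ((text.toList.length : Int) ≤ close_idx) ∨ text.toList.getD close_idx.toNat ' ' ≠ '}'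
  · simp only [if_pos hg]
  · simp only [if_neg hg]
    have h := pvALoop_eq_stack text.toList close_idx.toNat close_idx.toNat 0
    norm_num at h
    rw [h]
    cases hs : ((List.range close_idx.toNat).foldl (pvBStep text.toList) [])[0]? with
    | none => simp [List.head?_eq_getElem?, hs]
    | some j => simp [List.head?_eq_getElem?, hs]
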